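-- pv_equiv track=rewrite | github.com/Mount1ssir/-0-1_Knapsack_Problem | 2_assignment/VND/Seq_VND.py | local_search_1flip
-- ===== SOURCE A (Python) =====
-- def get_weight(x, n, w):
--     return sum(w[i]*x[i] for i in range(n))
--
-- def get_value(x, n, u):
--     return sum(u[i]*x[i] for i in range(n))
--
-- def local_search_1flip(x, n, W, u, w):
--     while True:
--         best_flip = -1
--         max_gain = 0
--         for i in range(n):
--             y = list(x)
--             y[i] = 1 - x[i]
--             if get_weight(y, n, w) <= W:
--                 gain = get_value(y, n, u) - get_value(x, n, u)
--                 if gain > max_gain: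
--                     max_gain = gain
--                     best_flip = i
--         if best_flip != -1:
--             x[best_flip] = 1 - x[best_flip]
--         else:
--             break
--     return x
-- ===== SOURCE B (Python) =====
-- def local_search_1flip(x, n, W, u, w):
--     cw = sum(w[i] * x[i] for i in range(n))
--     while True:
--         gains = [u[i] * (1 - 2 * x[i]) if cw + w[i] * (1 - 2 * x[i]) <= W else 0
--                  for i in range(n)]
--         m = max(gains, default=0)
--         if m <= 0:
--             return x
--         j = gains.index(m)
--         cw += w[j] * (1 - 2 * x[j])
--         x[j] = 1 - x[j]
-- ===== Notes on version B (the rewrite author's own statement) =====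
-- stated objective: alternative
-- what changed: B tracks the current weight incrementally and, per round, builds the list of per-flip gains (0 where infeasible), takes its maximum and flips at its first index, instead of A's per-candidate list copy with full weight/value recomputation and a running argmax (A rescans all n items per candidate, B scores each candidate by a delta); Pre_ excludes inputs with 0 < n exceeding a list length, on which A raises IndexError except when n only exceeds len(u) and no flip is ever feasible (then u is never touched and both return x unchanged).
-- outside the precondition, e.g. on local_search_1flip([0], 1, -1, [], [5]): A returns [0], B returns [0]
import Mathlib
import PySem

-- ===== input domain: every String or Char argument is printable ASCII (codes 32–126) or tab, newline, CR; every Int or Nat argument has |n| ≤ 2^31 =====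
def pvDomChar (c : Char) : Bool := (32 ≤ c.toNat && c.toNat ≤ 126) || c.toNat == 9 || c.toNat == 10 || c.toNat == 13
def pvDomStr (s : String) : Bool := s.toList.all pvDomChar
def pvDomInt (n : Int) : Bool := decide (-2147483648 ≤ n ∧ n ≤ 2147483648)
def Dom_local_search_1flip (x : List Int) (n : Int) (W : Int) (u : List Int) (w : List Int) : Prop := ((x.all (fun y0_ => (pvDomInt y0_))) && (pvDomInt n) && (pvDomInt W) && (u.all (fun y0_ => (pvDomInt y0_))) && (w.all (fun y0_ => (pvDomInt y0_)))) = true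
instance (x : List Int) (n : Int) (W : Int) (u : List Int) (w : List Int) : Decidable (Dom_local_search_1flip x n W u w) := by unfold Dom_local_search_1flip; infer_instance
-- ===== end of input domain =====

-- B keeps the current weight incrementally and, per round, builds the list of per-flip
-- gains (0 where infeasible), takes its max and flips at its first index — instead of A's
-- per-candidate list copy and full weight/value recomputation with a running argmax.
-- Both Pythons also mutate x in place identically; the equivalence proved is about the
-- return value. A's 'while True' terminates (value strictly increases); both ports run
-- the loop on the same sufficient fuel bound pvFuel.

-- ===== PORT A =====
-- sum(w[i]*x[i] for i in range(n))  (get_weight / get_value)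
def pvSumProd (x : List Int) (n : Int) (c : List Int) : Int :=
  (PySem.List.pyRange 0 n 1).foldl
    (fun s i => s + PySem.List.pyGetD c i 0 * PySem.List.pyGetD x i 0) 0

-- one pass of A's inner 'for i in range(n)' loop: returns (best_flip, max_gain)
def pvStepA (x : List Int) (n : Int) (W : Int) (u : List Int) (w : List Int) : Int × Int :=
  (PySem.List.pyRange 0 n 1).foldl
    (fun st i =>
      let y := PySem.List.pySetD x i (1 - PySem.List.pyGetD x i 0)
      if pvSumProd y n w ≤ W then
        let gain := pvSumProd y n u - pvSumProd x n u
        if gain > st.2 then (i, gain) else st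
      else st)
    (-1, 0)

def pvLoopA : Nat → List Int → Int → Int → List Int → List Int → List Int
  | 0, x, _, _, _, _ => x
  | f+1, x, n, W, u, w =>
    let st := pvStepA x n W u w
    if st.1 ≠ -1 then
      pvLoopA f (PySem.List.pySetD x st.1 (1 - PySem.List.pyGetD x st.1 0)) n W u w
    else x

-- fuel: the value strictly increases (by ≥ 1) each iteration and can move by at most
-- Σ|u_i|·(1+2·Σ|x_i|), so this bound exceeds the number of iterations of the Python loop
def pvFuel (x u : List Int) : Nat :=
  1 + (u.map Int.natAbs).sum * (1 + 2 * (x.map Int.natAbs).sum)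

def local_search_1flip (x : List Int) (n : Int) (W : Int) (u : List Int) (w : List Int) : List Int :=
  pvLoopA (pvFuel x u) x n W u w

-- ===== PORT B =====
-- the comprehension: gains[i] = u[i]*(1-2*x[i]) if the flip of i is feasible, else 0
def pvGains (x : List Int) (cw : Int) (n : Int) (W : Int) (u : List Int) (w : List Int) : List Int :=
  (PySem.List.pyRange 0 n 1).map (fun i =>
    if cw + PySem.List.pyGetD w i 0 * (1 - 2 * PySem.List.pyGetD x i 0) ≤ W then
      PySem.List.pyGetD u i 0 * (1 - 2 * PySem.List.pyGetD x i 0)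
    else 0)

def pvLoopB : Nat → List Int → Int → Int → Int → List Int → List Int → List Int
  | 0, x, _, _, _, _, _ => x
  | f+1, x, cw, n, W, u, w =>
    let gains := pvGains x cw n W u w
    let m := (PySem.List.max? gains (fun y => y)).getD 0  -- max(gains, default=0)
    if m ≤ 0 then x
    else
      match PySem.List.index? gains m with  -- gains.index(m); never none here since m ∈ gains
      | none => x
      | some j =>
        pvLoopB f (PySem.List.pySetD x (j : Int) (1 - PySem.List.pyGetD x (j : Int) 0))
          (cw + PySem.List.pyGetD w (j : Int) 0 * (1 - 2 * PySem.List.pyGetD x (j : Int) 0)) n W u w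

def local_search_1flip_alt (x : List Int) (n : Int) (W : Int) (u : List Int) (w : List Int) : List Int :=
  -- cw = sum(w[i]*x[i] for i in range(n))
  let cw := (PySem.List.pyRange 0 n 1).foldl
    (fun s i => s + PySem.List.pyGetD w i 0 * PySem.List.pyGetD x i 0) 0
  pvLoopB (pvFuel x u) x cw n W u w

-- ===== PRECONDITION & SPEC =====
-- Pre_ excludes 0 < n exceeding a list length: there Python A raises IndexError, except in the
-- corner where n only exceeds len(u) and no flip is ever feasible, so u is never read and A
-- returns x unchanged (B does the same there; see the cite in claim.json).
def Pre_local_search_1flip (x : List Int) (n : Int) (W : Int) (u : List Int) (w : List Int) : Prop :=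
  n ≤ 0 ∨ (n ≤ x.length ∧ n ≤ u.length ∧ n ≤ w.length)
instance (x : List Int) (n : Int) (W : Int) (u : List Int) (w : List Int) : Decidable (Pre_local_search_1flip x n W u w) := by unfold Pre_local_search_1flip; infer_instance

def pvWitness_local_search_1flip : List Int × Int × Int × List Int × List Int :=
  ([0, 1, 0], 3, 7, [4, 3, 5], [3, 4, 5])

def Spec_local_search_1flip (x : List Int) (n : Int) (W : Int) (u : List Int) (w : List Int) (out : List Int) : Prop := out = local_search_1flip_alt x n W u w
instance (x : List Int) (n : Int) (W : Int) (u : List Int) (w : List Int) (out : List Int) : Decidable (Spec_local_search_1flip x n W u w out) := by unfold Spec_local_search_1flip; infer_instance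

-- ===== CLAIM (what is proved, stated in full; the proofs are below) =====
def Claim_equal_local_search_1flip : Prop := ∀ (x : List Int) (n : Int) (W : Int) (u : List Int) (w : List Int), Dom_local_search_1flip x n W u w → Pre_local_search_1flip x n W u w → Spec_local_search_1flip x n W u w (local_search_1flip x n W u w)

-- ===== LEMMAS AND PROOFS =====

-- flipping index i changes a range-n dot product by c_i * (v - x_i)
theorem pvSumProd_set (x c : List Int) (n i v : Int)
    (h0 : 0 ≤ i) (hin : i < n) (hx : n ≤ (x.length : Int)) :
    pvSumProd (PySem.List.pySetD x i v) n c
      = pvSumProd x n c + PySem.List.pyGetD c i 0 * (v - PySem.List.pyGetD x i 0) := by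
  rw [PySem.List.pySetD_of_nonneg x v h0]
  unfold pvSumProd
  rw [PySem.List.foldl_add, PySem.List.foldl_add,
      PySem.List.pyRange_one_append 0 i n h0 (le_of_lt hin),
      PySem.List.pyRange_one_cons hin]
  simp only [List.map_append, List.map_cons, List.sum_append, List.sum_cons]
  have hget : ∀ j : Int, 0 ≤ j → j < (x.length : Int) → j ≠ i →
      PySem.List.pyGetD (x.set i.toNat v) j 0 = PySem.List.pyGetD x j 0 := by
    intro j hj0 hjl hji
    rw [PySem.List.pyGetD_eq_getElem _ 0 hj0 (by simpa using hjl),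
        PySem.List.pyGetD_eq_getElem _ 0 hj0 hjl,
        List.getElem_set]
    have : i.toNat ≠ j.toNat := by omega
    simp [this]
  have hmid : PySem.List.pyGetD (x.set i.toNat v) i 0 = v := by
    rw [PySem.List.pyGetD_eq_getElem _ 0 h0 (by simp; omega), List.getElem_set]
    simp
  have hlo : (PySem.List.pyRange 0 i 1).map
        (fun j => PySem.List.pyGetD c j 0 * PySem.List.pyGetD (x.set i.toNat v) j 0)
      = (PySem.List.pyRange 0 i 1).map
        (fun j => PySem.List.pyGetD c j 0 * PySem.List.pyGetD x j 0) := by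
    apply List.map_congr_left
    intro j hj
    obtain ⟨hj0, hji⟩ := PySem.List.mem_pyRange_one.mp hj
    rw [hget j hj0 (by omega) (by omega)]
  have hhi : (PySem.List.pyRange (i+1) n 1).map
        (fun j => PySem.List.pyGetD c j 0 * PySem.List.pyGetD (x.set i.toNat v) j 0)
      = (PySem.List.pyRange (i+1) n 1).map
        (fun j => PySem.List.pyGetD c j 0 * PySem.List.pyGetD x j 0) := by
    apply List.map_congr_left
    intro j hj
    obtain ⟨hj0, hji⟩ := PySem.List.mem_pyRange_one.mp hj
    rw [hget j (by omega) (by omega) (by omega)]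
  rw [hlo, hhi, hmid]
  ring

-- A's inner pass with the full-sum feasibility/gain tests replaced by the flip deltas
def pvStepD (x : List Int) (cw : Int) (n : Int) (W : Int) (u : List Int) (w : List Int) : Int × Int :=
  (PySem.List.pyRange 0 n 1).foldl
    (fun st i =>
      if cw + PySem.List.pyGetD w i 0 * (1 - 2 * PySem.List.pyGetD x i 0) ≤ W then
        if PySem.List.pyGetD u i 0 * (1 - 2 * PySem.List.pyGetD x i 0) > st.2 then
          (i, PySem.List.pyGetD u i 0 * (1 - 2 * PySem.List.pyGetD x i 0))
        else st
      else st)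
    (-1, 0)

theorem pvStep_eq (x : List Int) (n W : Int) (u w : List Int)
    (hp : Pre_local_search_1flip x n W u w) :
    pvStepD x (pvSumProd x n w) n W u w = pvStepA x n W u w := by
  unfold pvStepA pvStepD
  apply PySem.List.foldl_congr_mem
  intro st i hi
  obtain ⟨hi0, hin⟩ := PySem.List.mem_pyRange_one.mp hi
  have hb : n ≤ (x.length : Int) := by
    rcases hp with h | h
    · omega
    · exact_mod_cast h.1
  have hw := pvSumProd_set x w n i (1 - PySem.List.pyGetD x i 0) hi0 hin hb
  have hu := pvSumProd_set x u n i (1 - PySem.List.pyGetD x i 0) hi0 hin hb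
  have e : (1 - PySem.List.pyGetD x i 0) - PySem.List.pyGetD x i 0
      = 1 - 2 * PySem.List.pyGetD x i 0 := by ring
  dsimp only
  rw [hw, hu, e]
  have e2 : pvSumProd x n u + PySem.List.pyGetD u i 0 * (1 - 2 * PySem.List.pyGetD x i 0)
      - pvSumProd x n u = PySem.List.pyGetD u i 0 * (1 - 2 * PySem.List.pyGetD x i 0) := by ring
  rw [e2]

-- running max over two starts: foldl max (max a b) l = max a (foldl max b l)
theorem pvFoldlMax_max (l : List Int) : ∀ a b : Int,
    l.foldl max (max a b) = max a (l.foldl max b) := by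
  induction l with
  | nil => intro a b; rfl
  | cons c t ih =>
    intro a b
    simp only [List.foldl_cons]
    rw [max_assoc, ih]

-- characterization of the best-improving-flip pass: the fold computes the running max M of
-- the gain list (0 where infeasible) and the FIRST index attaining it (or keeps (b, m))
theorem pvArgmax_char (c : Int → Prop) [inst : DecidablePred c] (gd : Int → Int) (n : Int) :
    ∀ (k : Nat) (a b m : Int), (n - a).toNat ≤ k → 0 ≤ m →
    (PySem.List.pyRange a n 1).foldl
      (fun st i => if c i then (if gd i > st.2 then (i, gd i) else st) else st) (b, m)
    = (if m < ((PySem.List.pyRange a n 1).map (fun i => if c i then gd i else 0)).foldl max m then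
        (((PySem.List.pyRange a n 1).find?
            (fun i => (if c i then gd i else 0) == ((PySem.List.pyRange a n 1).map (fun i => if c i then gd i else 0)).foldl max m)).getD b,
         ((PySem.List.pyRange a n 1).map (fun i => if c i then gd i else 0)).foldl max m)
      else (b, m)) := by
  intro k
  induction k with
  | zero =>
    intro a b m hk hm
    rw [PySem.List.pyRange_one_eq_nil (by omega)]
    simp
  | succ k ih =>
    intro a b m hk hm
    by_cases han : a < n
    · rw [PySem.List.pyRange_one_cons han]
      set g : Int → Int := fun i => if c i then gd i else 0 with hg
      have hstep : (fun st i => if c i then (if gd i > st.2 then (i, gd i) else st) else st)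
            ((b, m) : Int × Int) a = if m < g a then (a, g a) else (b, m) := by
        by_cases hca : c a
        · by_cases hgt : m < gd a
          · simp [hg, hca, hgt, gt_iff_lt]
          · simp [hg, hca, hgt, gt_iff_lt]
        · have h0 : ¬ m < (0 : Int) := by omega
          simp [hg, hca, h0]
      simp only [List.foldl_cons, List.map_cons, hstep]
      by_cases hup : m < g a
      · rw [if_pos hup]
        have hga : (0:Int) ≤ g a := le_of_lt (lt_of_le_of_lt hm hup)
        have ihh := ih (a+1) a (g a) (by omega) hga
        rw [ihh]
        set M' := ((PySem.List.pyRange (a+1) n 1).map g).foldl max (g a) with hM'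
        have hMfold : ((PySem.List.pyRange (a+1) n 1).map g).foldl max (max m (g a)) = max m M' := by
          rw [pvFoldlMax_max]
        have hmax : max m (g a) = g a := by omega
        have hgaM : g a ≤ M' := (PySem.List.le_foldl_max _ _).1
        have hMeq : ((PySem.List.pyRange (a+1) n 1).map g).foldl max (max m (g a)) = M' := by
          rw [hMfold]; omega
        rw [hmax, hMeq] at *
        by_cases hlt : g a < M'
        · rw [if_pos hlt, if_pos (by omega)]
          have hne : ¬ ((fun i => (if c i then gd i else 0) == M') a) = true := by
            simp only [hg] at hlt ⊢; simp; omega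
          rw [List.find?_cons_of_neg (p := fun i => (if c i then gd i else 0) == M') hne]
          -- M' is attained in the tail, so find? is some and the default is irrelevant
          have hmem : M' ∈ (PySem.List.pyRange (a+1) n 1).map g := by
            rcases PySem.List.foldl_max_mem ((PySem.List.pyRange (a+1) n 1).map g) (g a) with h | h
            · omega
            · exact h
          obtain ⟨i, hi, hgi⟩ := List.mem_map.mp hmem
          have hsome : ((PySem.List.pyRange (a+1) n 1).find? (fun i => g i == M')).isSome := by
            rw [List.find?_isSome]
            exact ⟨i, hi, by simp [hgi]⟩
          obtain ⟨j, hj⟩ := Option.isSome_iff_exists.mp hsome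
          rw [hj]
          simp
        · rw [if_neg hlt]
          have hMga : M' = g a := by omega
          rw [if_pos (by omega)]
          have hpa : ((fun i => (if c i then gd i else 0) == M') a) = true := by
            simp only [hg] at hMga; simp [← hMga]
          rw [List.find?_cons_of_pos (p := fun i => (if c i then gd i else 0) == M') hpa]
          simp only [Option.getD_some, hMga]
      · rw [if_neg hup]
        have hle : g a ≤ m := by omega
        have ihh := ih (a+1) b m (by omega) hm
        rw [ihh]
        set M' := ((PySem.List.pyRange (a+1) n 1).map g).foldl max m with hM'
        have hmax : max m (g a) = m := by omega
        have hMeq : ((PySem.List.pyRange (a+1) n 1).map g).foldl max (max m (g a)) = M' := by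
          rw [hmax]
        rw [hMeq]
        by_cases hlt : m < M'
        · rw [if_pos hlt, if_pos hlt]
          have hne : ¬ ((fun i => (if c i then gd i else 0) == M') a) = true := by
            simp only [hg] at hle; simp; omega
          rw [List.find?_cons_of_neg (p := fun i => (if c i then gd i else 0) == M') hne]
        · rw [if_neg hlt, if_neg hlt]
    · rw [PySem.List.pyRange_one_eq_nil (by omega)]
      simp

-- gains.index(v) finds the position = the range element itself (offset a)
theorem pvIndex_find (g : Int → Int) (n v : Int) :
    ∀ (k : Nat) (a : Int), (n - a).toNat ≤ k →
    PySem.List.index? ((PySem.List.pyRange a n 1).map g) v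
      = ((PySem.List.pyRange a n 1).find? (fun i => g i == v)).map (fun i => (i - a).toNat) := by
  intro k
  induction k with
  | zero =>
    intro a hk
    rw [PySem.List.pyRange_one_eq_nil (by omega)]
    simp [PySem.List.index?]
  | succ k ih =>
    intro a hk
    by_cases han : a < n
    · rw [PySem.List.pyRange_one_cons han]
      simp only [List.map_cons]
      by_cases hv : g a = v
      · rw [hv, PySem.List.index?_cons_self]
        have hpa : ((fun i => g i == v) a) = true := by simp [hv]
        rw [List.find?_cons_of_pos (p := fun i => g i == v) hpa]
        simp
      · rw [PySem.List.index?_cons_of_ne _ hv]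
        have hna : ¬ ((fun i => g i == v) a) = true := by simp [hv]
        rw [List.find?_cons_of_neg (p := fun i => g i == v) hna]
        rw [ih (a+1) (by omega)]
        cases hf : (PySem.List.pyRange (a+1) n 1).find? (fun i => g i == v) with
        | none => simp
        | some i =>
          have hi : i ∈ PySem.List.pyRange (a+1) n 1 := List.mem_of_find?_eq_some hf
          have hia : a + 1 ≤ i := (PySem.List.mem_pyRange_one.mp hi).1
          simp only [Option.map_some]
          congr 1
          omega
    · rw [PySem.List.pyRange_one_eq_nil (by omega)]
      simp [PySem.List.index?]

theorem pvLoop_eq (f : Nat) : ∀ (x : List Int) (n W : Int) (u w : List Int),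
    Pre_local_search_1flip x n W u w →
    pvLoopB f x (pvSumProd x n w) n W u w = pvLoopA f x n W u w := by
  induction f with
  | zero => intro x n W u w _; rfl
  | succ f ih =>
    intro x n W u w hp
    set cw := pvSumProd x n w with hcw
    set g : Int → Int := fun i =>
      if cw + PySem.List.pyGetD w i 0 * (1 - 2 * PySem.List.pyGetD x i 0) ≤ W then
        PySem.List.pyGetD u i 0 * (1 - 2 * PySem.List.pyGetD x i 0) else 0 with hg
    have hgains : pvGains x cw n W u w = (PySem.List.pyRange 0 n 1).map g := rfl
    set M := ((PySem.List.pyRange 0 n 1).map g).foldl max 0 with hM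
    have hM0 : (0:Int) ≤ M := (PySem.List.le_foldl_max _ _).1
    -- A's pass, characterized
    have hstepA : pvStepA x n W u w
        = (if 0 < M then
            (((PySem.List.pyRange 0 n 1).find? (fun i => g i == M)).getD (-1), M)
          else (-1, 0)) := by
      rw [← pvStep_eq x n W u w hp]
      unfold pvStepD
      exact pvArgmax_char
        (fun i => cw + PySem.List.pyGetD w i 0 * (1 - 2 * PySem.List.pyGetD x i 0) ≤ W)
        (fun i => PySem.List.pyGetD u i 0 * (1 - 2 * PySem.List.pyGetD x i 0)) n
        n.toNat 0 (-1) 0 (by omega) le_rfl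
    simp only [pvLoopA, pvLoopB]
    by_cases hpos : 0 < M
    · -- there is an improving flip; both sides flip the same index
      have hMne : M ≠ 0 := by omega
      have hmem : M ∈ (PySem.List.pyRange 0 n 1).map g := by
        rcases PySem.List.foldl_max_mem ((PySem.List.pyRange 0 n 1).map g) 0 with h | h
        · exact absurd h hMne
        · exact h
      obtain ⟨i0, hi0, hgi0⟩ := List.mem_map.mp hmem
      have hfind : ((PySem.List.pyRange 0 n 1).find? (fun i => g i == M)).isSome := by
        rw [List.find?_isSome]; exact ⟨i0, hi0, by simp [hgi0]⟩
      obtain ⟨i, hfi⟩ := Option.isSome_iff_exists.mp hfind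
      have hiMem : i ∈ PySem.List.pyRange 0 n 1 := List.mem_of_find?_eq_some hfi
      obtain ⟨hi0', hiN⟩ := PySem.List.mem_pyRange_one.mp hiMem
      -- B's m equals M here
      have hBm : (PySem.List.max? (pvGains x cw n W u w) (fun y => y)).getD 0 = M := by
        cases hmg : (PySem.List.pyRange 0 n 1).map g with
        | nil => rw [hmg] at hmem; simp at hmem
        | cons a t =>
          rw [hgains, hmg, PySem.List.max?_id_cons, Option.getD_some]
          have hMM : M = max 0 (t.foldl max a) := by
            rw [hM, hmg]
            simp only [List.foldl_cons]
            exact pvFoldlMax_max t 0 a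
          have h1 : 0 < t.foldl max a := by
            by_contra hc
            rw [hMM, max_eq_left (not_lt.mp hc)] at hpos
            exact absurd hpos (lt_irrefl 0)
          rw [hMM, max_eq_right h1.le]
      -- B's index
      have hidx : PySem.List.index? (pvGains x cw n W u w) M = some (i - 0).toNat := by
        rw [hgains, pvIndex_find g n M n.toNat 0 (by omega), hfi]
        rfl
      have hstA : pvStepA x n W u w = (i, M) := by
        rw [hstepA, if_pos hpos, hfi]
        rfl
      rw [hBm, if_neg (not_le.mpr hpos), hidx]
      have hcast : ((i - 0).toNat : Int) = i := by omega
      simp only [hcast]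
      rw [hstA]
      rw [if_pos (show (i : Int) ≠ -1 by omega)]
      -- new cw is pvSumProd of the flipped x
      have hxl : n ≤ (x.length : Int) := by
        rcases hp with h | h
        · omega
        · exact_mod_cast h.1
      have hset := pvSumProd_set x w n i (1 - PySem.List.pyGetD x i 0) hi0' hiN hxl
      have e : (1 - PySem.List.pyGetD x i 0) - PySem.List.pyGetD x i 0
          = 1 - 2 * PySem.List.pyGetD x i 0 := by ring
      rw [e] at hset
      have hnew : cw + PySem.List.pyGetD w i 0 * (1 - 2 * PySem.List.pyGetD x i 0)
          = pvSumProd (PySem.List.pySetD x i (1 - PySem.List.pyGetD x i 0)) n w := by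
        rw [hset, hcw]
      rw [hnew]
      apply ih
      unfold Pre_local_search_1flip at hp ⊢
      rcases hp with h | h
      · left; exact h
      · right; rw [PySem.List.length_pySetD]; exact h
    · -- no improving flip: A's pass returns (-1, 0), B's m ≤ 0
      have hBm : (PySem.List.max? (pvGains x cw n W u w) (fun y => y)).getD 0 ≤ 0 := by
        cases hmg : (PySem.List.pyRange 0 n 1).map g with
        | nil => rw [hgains, hmg]; simp [PySem.List.max?]
        | cons a t =>
          rw [hgains, hmg, PySem.List.max?_id_cons, Option.getD_some]
          have hMM : M = max 0 (t.foldl max a) := by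
            rw [hM, hmg]
            simp only [List.foldl_cons]
            exact pvFoldlMax_max t 0 a
          rw [hMM] at hpos
          exact le_trans (le_max_right 0 _) (not_lt.mp hpos)
      have hstA : pvStepA x n W u w = (-1, 0) := by rw [hstepA, if_neg hpos]
      rw [if_pos hBm, hstA]
      simp

-- ===== VERDICT (by name: the statement is the Claim_ definition above) =====
theorem local_search_1flip_spec : Claim_equal_local_search_1flip := by
  intro x n W u w _ hp
  unfold Spec_local_search_1flip local_search_1flip local_search_1flip_alt
  have : (PySem.List.pyRange 0 n 1).foldl
      (fun s i => s + PySem.List.pyGetD w i 0 * PySem.List.pyGetD x i 0) 0 = pvSumProd x n w := rfl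
  rw [this]
  exact (pvLoop_eq (pvFuel x u) x n W u w hp).symm
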